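-- pv_equiv track=rewrite | github.com/Swpn0neel/semester-python-programs | Day 1 (No. 1-10)/6.py | sum_square_difference
-- ===== SOURCE A (Python) =====
-- def sum_square_difference(n):
--     s, s1= 0, 0
--     for i in range(1, n+1):
--         s= s+i
--         s1= s1+ (i**2)
--     s= s**2
--     diff= s - s1
--     return s1, s, diff
-- ===== SOURCE B (Python) =====
-- def sum_square_difference(n):
--     m = n if n > 0 else 0
--     s1 = m * (m + 1) * (2 * m + 1) // 6
--     s = (m * (m + 1) // 2) ** 2
--     return s1, s, s - s1
-- ===== Notes on version B (the rewrite author's own statement) =====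
-- stated objective: faster
-- what changed: Replaced the linear accumulation loop over the range by the closed-form Gauss and square-pyramidal series formulas, clamped at zero for non-positive n to match the empty range.
import Mathlib
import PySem

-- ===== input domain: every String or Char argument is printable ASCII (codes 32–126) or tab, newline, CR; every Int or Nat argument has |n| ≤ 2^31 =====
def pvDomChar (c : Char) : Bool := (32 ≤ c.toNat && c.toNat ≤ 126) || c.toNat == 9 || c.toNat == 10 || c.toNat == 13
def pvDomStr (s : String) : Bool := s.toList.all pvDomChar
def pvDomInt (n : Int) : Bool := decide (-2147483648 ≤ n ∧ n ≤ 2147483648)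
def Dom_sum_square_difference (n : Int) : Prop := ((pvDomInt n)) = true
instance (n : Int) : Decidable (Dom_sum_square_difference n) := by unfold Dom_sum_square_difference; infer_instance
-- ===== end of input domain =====

-- B replaces A's O(n) accumulation loop by the closed-form series formulas (O(1)).

-- ===== PORT A =====
def sum_square_difference (n : Int) : List Int :=
  let p := (PySem.List.pyRange 1 (n + 1) 1).foldl
    (fun (st : Int × Int) i => (st.1 + i, st.2 + i ^ 2)) (0, 0)
  let s := p.1 ^ 2
  let diff := s - p.2
  [p.2, s, diff]

-- ===== PORT B =====
def sum_square_difference_alt (n : Int) : List Int :=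
  let m := if n > 0 then n else 0
  let s1 := PySem.Int.floordiv (m * (m + 1) * (2 * m + 1)) 6
  let s := (PySem.Int.floordiv (m * (m + 1)) 2) ^ 2
  [s1, s, s - s1]

-- ===== PRECONDITION & SPEC =====
def Spec_sum_square_difference (n : Int) (out : List Int) : Prop := out = sum_square_difference_alt n
instance (n : Int) (out : List Int) : Decidable (Spec_sum_square_difference n out) := by unfold Spec_sum_square_difference; infer_instance

-- ===== CLAIM (what is proved, stated in full; the proofs are below) =====
def Claim_equal_sum_square_difference : Prop := ∀ (n : Int), Dom_sum_square_difference n → Spec_sum_square_difference n (sum_square_difference n)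

-- ===== LEMMAS AND PROOFS =====

-- A's loop state after summing 1..k: twice the first component is k(k+1)
-- and six times the second is k(k+1)(2k+1).
theorem pvLoop_eq (k : Nat) :
    ∃ t q : Int,
      (PySem.List.pyRange 1 ((k : Int) + 1) 1).foldl
        (fun (st : Int × Int) i => (st.1 + i, st.2 + i ^ 2)) (0, 0) = (t, q) ∧
      2 * t = (k : Int) * ((k : Int) + 1) ∧
      6 * q = (k : Int) * ((k : Int) + 1) * (2 * (k : Int) + 1) := by
  induction k with
  | zero => exact ⟨0, 0, by simp [PySem.List.pyRange_one_eq_nil], by norm_num, by norm_num⟩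
  | succ k ih =>
    obtain ⟨t, q, hfold, ht, hq⟩ := ih
    refine ⟨t + ((k : Int) + 1), q + ((k : Int) + 1) ^ 2, ?_, by push_cast; linarith, ?_⟩
    · have h1 : (1 : Int) ≤ (k : Int) + 1 := by omega
      have hsplit : PySem.List.pyRange 1 (((k : Int) + 1) + 1) 1 =
          PySem.List.pyRange 1 ((k : Int) + 1) 1 ++ [(k : Int) + 1] :=
        PySem.List.pyRange_one_succ_right h1
      push_cast
      rw [hsplit, List.foldl_append, hfold]
      simp
    · push_cast
      nlinarith [hq]

-- ===== VERDICT (by name: the statement is the Claim_ definition above) =====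
theorem sum_square_difference_spec : Claim_equal_sum_square_difference := by
  intro n _
  unfold Spec_sum_square_difference sum_square_difference sum_square_difference_alt
  by_cases hn : n > 0
  · obtain ⟨t, q, hfold, ht, hq⟩ := pvLoop_eq n.toNat
    have hcast : ((n.toNat : Int)) = n := Int.toNat_of_nonneg (le_of_lt hn)
    rw [hcast] at hfold ht hq
    simp only [hn, if_pos, hfold]
    have h6 : PySem.Int.floordiv (n * (n + 1) * (2 * n + 1)) 6 = q := by
      rw [PySem.Int.floordiv_eq_ediv_of_pos (by norm_num), ← hq,
        Int.mul_ediv_cancel_left q (by norm_num)]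
    have h2 : PySem.Int.floordiv (n * (n + 1)) 2 = t := by
      rw [PySem.Int.floordiv_eq_ediv_of_pos (by norm_num), ← ht,
        Int.mul_ediv_cancel_left t (by norm_num)]
    simp only [h6, h2]
  · have hempty : PySem.List.pyRange 1 (n + 1) 1 = [] :=
      PySem.List.pyRange_one_eq_nil (by omega)
    simp [hempty, hn, PySem.Int.floordiv]
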